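-- pv_equiv track=rewrite | github.com/kyrylo-sovailo/benchmark_masterrace | source/masterrace.py | generate_configurations_around
-- ===== SOURCE A (Python) =====
-- ALL_COMPILERS = [ "CMP_GPP" ]
--
-- ALL_COMPILER_OPTIONS = [ "OPT_DEFAULT", "OPT_NATIVE", "OPT_RTTI", "OPT_LTO", "OPT_BASE", "OPT_DEFAULT32", "OPT_NATIVE32", "OPT_RTTI32", "OPT_LTO32", "OPT_BASE32" ]
--
-- ALL_VECTOR_STRUCTURES = [ "VEC_CPP", "VEC_POINTER", "VEC_SIZE_T", "VEC_UINT", "VEC_POINTER_NO_CAPACITY", "VEC_SIZE_T_NO_CAPACITY" ]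
--
-- ALL_ALLOCATORS = [ "ALC_ALLOCATOR", "ALC_NEW", "ALC_NEW_NO_DELETE", "ALC_MALLOC", "ALC_REALLOC", "ALC_MALLOC_NO_FREE" ]
--
-- ALL_MULTITHREADINGS = [ "MLT_NO" ]
--
-- ALL_IOS = [ "IO_CPP_LINE", "IO_C_LINE" ]
--
-- ALL_LIBCS = [ "LC_YES" ]
--
-- ALL_KNOWLEDGES = [ "PK_NO" ]
--
-- def generate_configurations_around(configuration, include_configuration):
--     configurations = []
--     (compiler, compiler_options, vector_structure, allocator, multithreading, io, libc, knowledge) = configuration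
--     configurations += [ (r, compiler_options, vector_structure, allocator, multithreading, io, libc, knowledge) for r in ALL_COMPILERS ]
--     configurations += [ (compiler, r, vector_structure, allocator, multithreading, io, libc, knowledge) for r in ALL_COMPILER_OPTIONS ]
--     configurations += [ (compiler, compiler_options, r, allocator, multithreading, io, libc, knowledge) for r in ALL_VECTOR_STRUCTURES ]
--     configurations += [ (compiler, compiler_options, vector_structure, r, multithreading, io, libc, knowledge) for r in ALL_ALLOCATORS ]
--     configurations += [ (compiler, compiler_options, vector_structure, allocator, r, io, libc, knowledge) for r in ALL_MULTITHREADINGS ]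
--     configurations += [ (compiler, compiler_options, vector_structure, allocator, multithreading, r, libc, knowledge) for r in ALL_IOS ]
--     configurations += [ (compiler, compiler_options, vector_structure, allocator, multithreading, io, r, knowledge) for r in ALL_LIBCS ]
--     configurations += [ (compiler, compiler_options, vector_structure, allocator, multithreading, io, libc, r) for r in ALL_KNOWLEDGES ]
--     if not include_configuration: configurations = [ c for c in configurations if c != configurations ]
--     return configurations
-- ===== SOURCE B (Python) =====
-- ALL_COMPILERS = [ "CMP_GPP" ]
-- ALL_COMPILER_OPTIONS = [ "OPT_DEFAULT", "OPT_NATIVE", "OPT_RTTI", "OPT_LTO", "OPT_BASE", "OPT_DEFAULT32", "OPT_NATIVE32", "OPT_RTTI32", "OPT_LTO32", "OPT_BASE32" ]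
-- ALL_VECTOR_STRUCTURES = [ "VEC_CPP", "VEC_POINTER", "VEC_SIZE_T", "VEC_UINT", "VEC_POINTER_NO_CAPACITY", "VEC_SIZE_T_NO_CAPACITY" ]
-- ALL_ALLOCATORS = [ "ALC_ALLOCATOR", "ALC_NEW", "ALC_NEW_NO_DELETE", "ALC_MALLOC", "ALC_REALLOC", "ALC_MALLOC_NO_FREE" ]
-- ALL_MULTITHREADINGS = [ "MLT_NO" ]
-- ALL_IOS = [ "IO_CPP_LINE", "IO_C_LINE" ]
-- ALL_LIBCS = [ "LC_YES" ]
-- ALL_KNOWLEDGES = [ "PK_NO" ]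
--
-- _OPTION_TABLE = [ALL_COMPILERS, ALL_COMPILER_OPTIONS, ALL_VECTOR_STRUCTURES, ALL_ALLOCATORS,
--                  ALL_MULTITHREADINGS, ALL_IOS, ALL_LIBCS, ALL_KNOWLEDGES]
--
-- def _around(prefix, remaining, option_lists):
--     # Structural recursion: peel one field off the front; the variants for that field
--     # are prefix + replacement + untouched suffix; then move the field into the prefix.
--     if not remaining:
--         return []
--     head = remaining[0]
--     rest = remaining[1:]
--     here = [prefix + (r,) + rest for r in option_lists[0]]
--     return here + _around(prefix + (head,), rest, option_lists[1:])
--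
-- def generate_configurations_around(configuration, include_configuration):
--     (compiler, compiler_options, vector_structure, allocator, multithreading, io, libc, knowledge) = configuration
--     return _around((), (compiler, compiler_options, vector_structure, allocator, multithreading, io, libc, knowledge), _OPTION_TABLE)
-- ===== Notes on version B (the rewrite author's own statement) =====
-- stated objective: alternative
-- what changed: Replaces A's eight hard-coded per-field list comprehensions (plus a no-op filter) with one structural recursion that peels fields off the front, carrying a processed-prefix / untouched-suffix pair and a table of option lists; each variant is prefix + replacement + suffix by tuple concatenation.
import Mathlib
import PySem

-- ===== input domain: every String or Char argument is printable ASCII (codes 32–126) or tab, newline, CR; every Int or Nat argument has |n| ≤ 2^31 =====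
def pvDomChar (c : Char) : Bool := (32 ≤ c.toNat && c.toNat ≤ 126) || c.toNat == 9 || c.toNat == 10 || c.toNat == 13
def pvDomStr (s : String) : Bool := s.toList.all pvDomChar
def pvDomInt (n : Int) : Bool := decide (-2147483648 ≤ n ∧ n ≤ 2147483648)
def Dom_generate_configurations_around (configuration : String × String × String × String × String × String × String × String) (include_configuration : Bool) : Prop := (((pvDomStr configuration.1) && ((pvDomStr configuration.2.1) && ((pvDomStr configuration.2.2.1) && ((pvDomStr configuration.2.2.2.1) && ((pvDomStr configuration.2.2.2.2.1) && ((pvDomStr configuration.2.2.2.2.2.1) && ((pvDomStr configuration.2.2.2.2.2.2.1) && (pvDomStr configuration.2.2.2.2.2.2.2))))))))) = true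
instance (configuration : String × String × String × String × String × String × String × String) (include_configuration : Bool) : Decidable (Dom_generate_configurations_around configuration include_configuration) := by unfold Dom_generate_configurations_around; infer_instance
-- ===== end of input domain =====

-- ===== PORT A =====
-- Header: B replaces A's eight staged per-field comprehensions with one structural recursion
-- carrying a prefix/suffix pair over a table of option lists (alternative decomposition,
-- same cost); return value only (neither program mutates its arguments).
def pvAllCompilers : List String := ["CMP_GPP"]
def pvAllCompilerOptions : List String := ["OPT_DEFAULT", "OPT_NATIVE", "OPT_RTTI", "OPT_LTO", "OPT_BASE", "OPT_DEFAULT32", "OPT_NATIVE32", "OPT_RTTI32", "OPT_LTO32", "OPT_BASE32"]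
def pvAllVectorStructures : List String := ["VEC_CPP", "VEC_POINTER", "VEC_SIZE_T", "VEC_UINT", "VEC_POINTER_NO_CAPACITY", "VEC_SIZE_T_NO_CAPACITY"]
def pvAllAllocators : List String := ["ALC_ALLOCATOR", "ALC_NEW", "ALC_NEW_NO_DELETE", "ALC_MALLOC", "ALC_REALLOC", "ALC_MALLOC_NO_FREE"]
def pvAllMultithreadings : List String := ["MLT_NO"]
def pvAllIos : List String := ["IO_CPP_LINE", "IO_C_LINE"]
def pvAllLibcs : List String := ["LC_YES"]
def pvAllKnowledges : List String := ["PK_NO"]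

def generate_configurations_around (configuration : String × String × String × String × String × String × String × String) (include_configuration : Bool) : List (String × String × String × String × String × String × String × String) :=
  let (compiler, compiler_options, vector_structure, allocator, multithreading, io, libc, knowledge) := configuration
  let configurations : List (String × String × String × String × String × String × String × String) := []
  let configurations := configurations ++ pvAllCompilers.map (fun r => (r, compiler_options, vector_structure, allocator, multithreading, io, libc, knowledge))
  let configurations := configurations ++ pvAllCompilerOptions.map (fun r => (compiler, r, vector_structure, allocator, multithreading, io, libc, knowledge))
  let configurations := configurations ++ pvAllVectorStructures.map (fun r => (compiler, compiler_options, r, allocator, multithreading, io, libc, knowledge))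
  let configurations := configurations ++ pvAllAllocators.map (fun r => (compiler, compiler_options, vector_structure, r, multithreading, io, libc, knowledge))
  let configurations := configurations ++ pvAllMultithreadings.map (fun r => (compiler, compiler_options, vector_structure, allocator, r, io, libc, knowledge))
  let configurations := configurations ++ pvAllIos.map (fun r => (compiler, compiler_options, vector_structure, allocator, multithreading, r, libc, knowledge))
  let configurations := configurations ++ pvAllLibcs.map (fun r => (compiler, compiler_options, vector_structure, allocator, multithreading, io, r, knowledge))
  let configurations := configurations ++ pvAllKnowledges.map (fun r => (compiler, compiler_options, vector_structure, allocator, multithreading, io, libc, r))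
  -- Python's filter keeps c when `c != configurations`; c is a tuple and `configurations` a
  -- list, so in Python the comparison is always unequal and the predicate is always True (exact).
  let configurations := if !include_configuration then configurations.filter (fun _ => true) else configurations
  configurations

-- ===== PORT B =====
-- prefix + (r,) + rest always has total length 8 here, so the Python tuple concatenation
-- yields an 8-tuple; pvTuple8 rebuilds it from the concatenated length-8 list (exact).
def pvTuple8 (l : List String) : String × String × String × String × String × String × String × String :=
  (l.getD 0 "", l.getD 1 "", l.getD 2 "", l.getD 3 "", l.getD 4 "", l.getD 5 "", l.getD 6 "", l.getD 7 "")

-- _around: structural recursion on `remaining`; the (remaining nonempty, option_lists empty)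
-- case is unreachable in B's calls (both sequences have length 8), returns [] there.
def pvAround (pre : List String) (remaining : List String) (option_lists : List (List String)) : List (String × String × String × String × String × String × String × String) :=
  match remaining, option_lists with
  | [], _ => []
  | head :: rest, opts :: option_rest =>
      opts.map (fun r => pvTuple8 (pre ++ r :: rest)) ++ pvAround (pre ++ [head]) rest option_rest
  | _ :: _, [] => []

def generate_configurations_around_alt (configuration : String × String × String × String × String × String × String × String) (include_configuration : Bool) : List (String × String × String × String × String × String × String × String) :=
  let (compiler, compiler_options, vector_structure, allocator, multithreading, io, libc, knowledge) := configuration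
  pvAround [] [compiler, compiler_options, vector_structure, allocator, multithreading, io, libc, knowledge]
    [pvAllCompilers, pvAllCompilerOptions, pvAllVectorStructures, pvAllAllocators, pvAllMultithreadings, pvAllIos, pvAllLibcs, pvAllKnowledges]

-- ===== PRECONDITION & SPEC =====
def Spec_generate_configurations_around (configuration : String × String × String × String × String × String × String × String) (include_configuration : Bool) (out : List (String × String × String × String × String × String × String × String)) : Prop := out = generate_configurations_around_alt configuration include_configuration
instance (configuration : String × String × String × String × String × String × String × String) (include_configuration : Bool) (out : List (String × String × String × String × String × String × String × String)) : Decidable (Spec_generate_configurations_around configuration include_configuration out) := by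
  unfold Spec_generate_configurations_around
  -- instance search for the 8-fold product exceeds the default synthesis size; build the term explicitly
  have h : DecidableEq (String × String × String × String × String × String × String × String) :=
    @instDecidableEqProd _ _ _ (@instDecidableEqProd _ _ _ (@instDecidableEqProd _ _ _
      (@instDecidableEqProd _ _ _ (@instDecidableEqProd _ _ _ (@instDecidableEqProd _ _ _
        (@instDecidableEqProd _ _ _ inferInstance))))))
  exact @instDecidableEqList _ h _ _

-- ===== CLAIM (what is proved, stated in full; the proofs are below) =====
def Claim_equal_generate_configurations_around : Prop := ∀ (configuration : String × String × String × String × String × String × String × String) (include_configuration : Bool), Dom_generate_configurations_around configuration include_configuration → Spec_generate_configurations_around configuration include_configuration (generate_configurations_around configuration include_configuration)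

-- ===== LEMMAS AND PROOFS =====

-- ===== VERDICT (by name: the statement is the Claim_ definition above) =====
theorem generate_configurations_around_spec : Claim_equal_generate_configurations_around := by
  intro configuration include_configuration _
  obtain ⟨a, b, c, d, e, f, g, h⟩ := configuration
  unfold Spec_generate_configurations_around
  cases include_configuration <;>
    simp [generate_configurations_around, generate_configurations_around_alt,
      pvAllCompilers, pvAllCompilerOptions, pvAllVectorStructures, pvAllAllocators,
      pvAllMultithreadings, pvAllIos, pvAllLibcs, pvAllKnowledges, pvAround, pvTuple8]
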